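-- pv_equiv track=rewrite | github.com/BGU-Elad/crohn | src/utils/utils.py | take_two_from_each_cycle
-- ===== SOURCE A (Python) =====
-- def take_two_from_each_cycle(lists):
--     result = []
--     while any(lists):
--         for lst in lists:
--             if len(lst) >= 2:
--                 result.extend(lst[:2])
--                 del lst[:2]
--             elif len(lst) == 1:
--                 result.append(lst[0])
--                 del lst[0]
--     return result
-- ===== SOURCE B (Python) =====
-- def take_two_from_each_cycle(lists):
--     # Note: unlike A, this does not mutate the input lists; return value is identical.
--     chunks = [[lst[j:j + 2] for j in range(0, len(lst), 2)] for lst in lists]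
--     n = max((len(c) for c in chunks), default=0)
--     result = []
--     for i in range(n):
--         for c in chunks:
--             if i < len(c):
--                 result.extend(c[i])
--     return result
-- ===== Notes on version B (the rewrite author's own statement) =====
-- stated objective: alternative
-- what changed: A repeatedly rescans the lists, slicing and deleting two elements from the front of each until all are empty; B instead chunks every list into consecutive pairs once, then transposes the chunk table cycle by cycle and flattens it, without mutating the input.
import Mathlib
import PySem

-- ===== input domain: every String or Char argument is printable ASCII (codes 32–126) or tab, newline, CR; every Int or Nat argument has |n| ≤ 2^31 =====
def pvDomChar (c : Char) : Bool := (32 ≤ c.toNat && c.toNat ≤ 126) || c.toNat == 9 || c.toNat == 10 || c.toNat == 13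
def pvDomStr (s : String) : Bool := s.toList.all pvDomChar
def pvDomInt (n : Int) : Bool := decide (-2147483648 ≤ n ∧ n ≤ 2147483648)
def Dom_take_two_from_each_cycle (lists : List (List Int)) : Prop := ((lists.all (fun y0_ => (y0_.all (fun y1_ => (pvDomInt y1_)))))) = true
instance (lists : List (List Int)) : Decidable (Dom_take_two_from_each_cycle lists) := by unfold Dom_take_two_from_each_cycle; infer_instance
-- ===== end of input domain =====

-- B replaces A's "repeatedly scan lists, taking and deleting two from the front of each" with
-- "chunk every list into consecutive pairs once, then transpose the chunk table" (alternative
-- decomposition). A mutates its argument lists in place (B does not); the equivalence proved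
-- here is about the RETURN value only.

-- ===== PORT A =====
-- one pass of A's `for lst in lists` body: accumulates (result, the mutated lists)
def pvAStep (acc : List Int × List (List Int)) (lst : List Int) : List Int × List (List Int) :=
  if lst.length ≥ 2 then
    (acc.1 ++ PySem.List.slice lst none (some 2), acc.2 ++ [lst.drop 2])   -- result.extend(lst[:2]); del lst[:2]
  else if lst.length = 1 then
    (acc.1 ++ [PySem.List.pyGetD lst 0 0], acc.2 ++ [lst.drop 1])          -- result.append(lst[0]); del lst[0]
  else
    (acc.1, acc.2 ++ [lst])

-- termination helper for the while-loop port (cited by decreasing_by)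
theorem pvAStep_foldl (ls : List (List Int)) (res : List Int) (acc : List (List Int)) :
    ls.foldl pvAStep (res, acc) =
      (res ++ ls.flatMap (fun l => l.take 2), acc ++ ls.map (fun l => l.drop 2)) := by
  induction ls generalizing res acc with
  | nil => simp
  | cons l t ih =>
    rcases l with _ | ⟨a, _ | ⟨b, u⟩⟩ <;>
      simp [pvAStep, ih, PySem.List.slice_to (b := 2) _ (by norm_num), PySem.List.pyGetD]

theorem pvSumLen_le (ls : List (List Int)) :
    ((ls.map (fun l => l.drop 2)).map List.length).sum ≤ (ls.map List.length).sum := by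
  induction ls with
  | nil => simp
  | cons l t ih => simp only [List.map_cons, List.sum_cons]; have := l.length_drop (i := 2); omega

theorem pvSumLen_lt (ls : List (List Int)) (h : ls.any (fun l => !l.isEmpty) = true) :
    ((ls.map (fun l => l.drop 2)).map List.length).sum < (ls.map List.length).sum := by
  induction ls with
  | nil => simp at h
  | cons l t ih =>
    simp only [List.any_cons, Bool.or_eq_true] at h
    simp only [List.map_cons, List.sum_cons]
    rcases h with h | h
    · have h1 : 0 < l.length := by
        cases l <;> simp_all
      have := l.length_drop (i := 2)
      have := pvSumLen_le t
      omega
    · have := l.length_drop (i := 2)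
      have := ih h
      omega

-- one full pass of A's while-loop body over all lists
def pvACycle (lists : List (List Int)) (result : List Int) : List Int × List (List Int) :=
  lists.foldl pvAStep (result, [])

def pvALoop (lists : List (List Int)) (result : List Int) : List Int :=
  if h : lists.any (fun l => !l.isEmpty) then
    pvALoop (pvACycle lists result).2 (pvACycle lists result).1
  else result
termination_by (lists.map List.length).sum
decreasing_by
  rw [pvACycle, pvAStep_foldl]
  simpa using pvSumLen_lt lists h

def take_two_from_each_cycle (lists : List (List Int)) : List Int :=
  pvALoop lists []

-- ===== PORT B =====
-- chunks of two consecutive elements: [lst[j:j+2] for j in range(0, len(lst), 2)]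
def pvChunkPairs (lst : List Int) : List (List Int) :=
  (PySem.List.pyRange 0 (lst.length : Int) 2).map
    (fun j => PySem.List.slice lst (some j) (some (j + 2)))

def take_two_from_each_cycle_alt (lists : List (List Int)) : List Int :=
  let chunks := lists.map pvChunkPairs
  let n := PySem.List.maxD (chunks.map (fun c => (c.length : Int))) id 0
  (PySem.List.pyRange 0 n 1).foldl
    (fun result i =>
      chunks.foldl
        (fun result c =>
          if i < (c.length : Int) then result ++ PySem.List.pyGetD c i [] else result)
        result)
    []

-- ===== PRECONDITION & SPEC =====
def Spec_take_two_from_each_cycle (lists : List (List Int)) (out : List Int) : Prop := out = take_two_from_each_cycle_alt lists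
instance (lists : List (List Int)) (out : List Int) : Decidable (Spec_take_two_from_each_cycle lists out) := by unfold Spec_take_two_from_each_cycle; infer_instance

-- ===== CLAIM (what is proved, stated in full; the proofs are below) =====
def Claim_equal_take_two_from_each_cycle : Prop := ∀ (lists : List (List Int)), Dom_take_two_from_each_cycle lists → Spec_take_two_from_each_cycle lists (take_two_from_each_cycle lists)

-- ===== LEMMAS AND PROOFS =====

-- number of pair-chunks of a list
def pvNC (l : List Int) : Nat := (l.length + 1) / 2

def pvMaxChunks (ls : List (List Int)) : Nat := (ls.map pvNC).foldl max 0

-- the common canonical form: n round-robin cycles, each taking two from the front of each list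
def pvG : Nat → List (List Int) → List Int
  | 0, _ => []
  | n + 1, ls => ls.flatMap (fun l => l.take 2) ++ pvG n (ls.map (fun l => l.drop 2))

theorem pvChunkPairs_range (lst : List Int) :
    pvChunkPairs lst = (List.range (pvNC lst)).map (fun k => (lst.drop (2 * k)).take 2) := by
  unfold pvChunkPairs
  rw [PySem.List.pyRange_of_pos 0 (lst.length : Int) (by norm_num)]
  rw [List.map_map]
  have hcnt : (if (0 : Int) < (lst.length : Int) then (((lst.length : Int) - 0 + 2 - 1) / 2).toNat else 0) = pvNC lst := by
    unfold pvNC; split <;> omega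
  rw [hcnt]
  refine List.map_congr_left (fun k _ => ?_)
  simp only [Function.comp_apply]
  rw [PySem.List.slice_toNat lst (a := 0 + 2 * (k : Int)) (b := 0 + 2 * (k : Int) + 2) (by positivity) (by positivity)]
  rw [show (0 + 2 * (k : Int)).toNat = 2 * k from by omega,
      show (0 + 2 * (k : Int) + 2).toNat = 2 * k + 2 from by omega,
      show 2 * k + 2 - 2 * k = 2 from by omega]

theorem pvG_eq_range (n : Nat) (ls : List (List Int)) :
    (List.range n).flatMap (fun k => ls.flatMap (fun l => (l.drop (2 * k)).take 2)) = pvG n ls := by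
  induction n generalizing ls with
  | zero => simp [pvG]
  | succ n ih =>
    rw [List.range_succ_eq_map, List.flatMap_cons, List.flatMap_map]
    simp only [pvG, Nat.mul_zero, List.drop_zero]
    congr 1
    rw [← ih (ls.map (fun l => l.drop 2))]
    congr 1
    funext k
    rw [List.flatMap_map]
    congr 1
    funext l
    simp only [List.drop_drop]
    congr 2
    omega

-- value of Python's max(..., default=0) over casts of naturals
theorem pvMaxD_aux (t : List Nat) (m : Nat) :
    PySem.List.maxD ((m :: t).map (fun (k : Nat) => (k : Int))) id 0 = ((t.foldl max m : Nat) : Int) := by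
  induction t generalizing m with
  | nil => simp [PySem.List.maxD, PySem.List.max?]
  | cons x u ih =>
    have key : PySem.List.maxD ((m :: x :: u).map (fun (k : Nat) => (k : Int))) id 0
        = PySem.List.maxD ((max m x :: u).map (fun (k : Nat) => (k : Int))) id 0 := by
      simp only [PySem.List.maxD, PySem.List.max?, List.map_cons, List.foldl_cons]
      have hinit : (if id ((m : Int)) < id ((x : Int)) then some ((x : Int)) else some ((m : Int)))
          = some ((max m x : Nat) : Int) := by
        simp only [id]
        split <;> (congr 1; omega)
      rw [hinit]
    rw [key, ih (max m x)]
    simp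

theorem pvMaxD_natCast (ns : List Nat) :
    PySem.List.maxD (ns.map (fun (k : Nat) => (k : Int))) id 0 = ((ns.foldl max 0 : Nat) : Int) := by
  cases ns with
  | nil => simp [PySem.List.maxD, PySem.List.max?]
  | cons m t =>
    rw [pvMaxD_aux t m]
    simp only [List.foldl_cons, Nat.zero_max]

theorem pvFoldl_if_append {α : Type} (p : α → Bool) (g : α → List Int) (l : List α) (acc : List Int) :
    l.foldl (fun r c => if p c then r ++ g c else r) acc
      = acc ++ l.flatMap (fun c => if p c then g c else []) := by
  have h : (fun (r : List Int) c => if p c then r ++ g c else r)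
      = fun r c => r ++ (if p c then g c else []) := by
    funext r c; split <;> simp
  rw [h, PySem.List.foldl_append_eq_flatMap]

theorem pvChunkAt (l : List Int) (k : Nat) :
    (if ((k : Int)) < ((pvChunkPairs l).length : Int) then PySem.List.pyGetD (pvChunkPairs l) ((k : Int)) [] else [])
      = (l.drop (2 * k)).take 2 := by
  rw [pvChunkPairs_range]
  rw [PySem.List.pyGetD_natCast]
  simp only [List.length_map, List.length_range]
  by_cases h : k < pvNC l
  · rw [if_pos (by exact_mod_cast h)]
    rw [List.getD_eq_getElem _ _ (by simpa using h)]
    simp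
  · rw [if_neg (by omega)]
    have h2 : l.length <= 2 * k := by unfold pvNC at h; omega
    rw [List.drop_eq_nil_of_le h2, List.take_nil]

-- B computes pvG (pvMaxChunks ls) ls
theorem pvAlt_eq_G (ls : List (List Int)) :
    take_two_from_each_cycle_alt ls = pvG (pvMaxChunks ls) ls := by
  unfold take_two_from_each_cycle_alt
  have hlen : (ls.map pvChunkPairs).map (fun c => ((c.length : Int)))
      = (ls.map pvNC).map (fun (k : Nat) => (k : Int)) := by
    simp only [List.map_map]
    refine List.map_congr_left (fun l _ => ?_)
    simp [pvChunkPairs_range, pvNC]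
  simp only [hlen, pvMaxD_natCast]
  rw [show ((ls.map pvNC).foldl max 0) = pvMaxChunks ls from rfl]
  rw [PySem.List.pyRange_zero_natCast (pvMaxChunks ls)]
  rw [List.foldl_map]
  have hstep : ∀ (acc : List Int) (k : Nat),
      (ls.map pvChunkPairs).foldl
        (fun r c => if ((k : Int)) < ((c.length : Int)) then r ++ PySem.List.pyGetD c ((k : Int)) [] else r) acc
      = acc ++ ls.flatMap (fun l => (l.drop (2 * k)).take 2) := by
    intro acc k
    rw [show (fun (r : List Int) (c : List (List Int)) => if ((k : Int)) < ((c.length : Int)) then r ++ PySem.List.pyGetD c ((k : Int)) [] else r)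
        = (fun r c => if (decide (((k : Int)) < ((c.length : Int)))) then r ++ PySem.List.pyGetD c ((k : Int)) [] else r) from by
      funext r c; simp]
    rw [pvFoldl_if_append]
    congr 1
    rw [List.flatMap_map]
    congr 1
    funext l
    simp only [decide_eq_true_eq]
    exact pvChunkAt l k
  have hfold : ∀ (ks : List Nat) (acc : List Int),
      ks.foldl (fun result (k : Nat) =>
        (ls.map pvChunkPairs).foldl
          (fun r c => if ((k : Int)) < ((c.length : Int)) then r ++ PySem.List.pyGetD c ((k : Int)) [] else r) result) acc
      = acc ++ ks.flatMap (fun k => ls.flatMap (fun l => (l.drop (2 * k)).take 2)) := by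
    intro ks
    induction ks with
    | nil => simp
    | cons k t ih =>
      intro acc
      rw [List.foldl_cons, hstep, ih, List.flatMap_cons, List.append_assoc]
  rw [hfold, List.nil_append, pvG_eq_range]

-- maxChunks arithmetic
theorem pvMax_foldl_sub (ns : List Nat) (m : Nat) :
    (ns.map (fun k => k - 1)).foldl max (m - 1) = ns.foldl max m - 1 := by
  induction ns generalizing m with
  | nil => rfl
  | cons x t ih =>
    simp only [List.map_cons, List.foldl_cons]
    rw [show max (m - 1) (x - 1) = max m x - 1 from by omega, ih]

theorem pvMaxChunks_drop (ls : List (List Int)) :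
    pvMaxChunks (ls.map (fun l => l.drop 2)) = pvMaxChunks ls - 1 := by
  unfold pvMaxChunks
  have h : (ls.map (fun l => l.drop 2)).map pvNC = (ls.map pvNC).map (fun k => k - 1) := by
    simp only [List.map_map]
    refine List.map_congr_left (fun l _ => ?_)
    simp only [Function.comp_apply]
    unfold pvNC
    rw [List.length_drop]
    omega
  rw [h]
  exact pvMax_foldl_sub (ls.map pvNC) 0

theorem pvMax_foldl_le (ns : List Nat) (m : Nat) : m ≤ ns.foldl max m := by
  induction ns generalizing m with
  | nil => simp
  | cons x t ih => exact le_trans (Nat.le_max_left m x) (ih (max m x))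

theorem pvMax_foldl_mono (ns : List Nat) (m m' : Nat) (h : m ≤ m') :
    ns.foldl max m ≤ ns.foldl max m' := by
  induction ns generalizing m m' with
  | nil => simpa
  | cons x t ih => exact ih _ _ (by omega)

theorem pvMaxChunks_pos (ls : List (List Int)) (h : ls.any (fun l => !l.isEmpty) = true) :
    1 ≤ pvMaxChunks ls := by
  unfold pvMaxChunks
  induction ls with
  | nil => simp at h
  | cons l t ih =>
    simp only [List.any_cons, Bool.or_eq_true] at h
    simp only [List.map_cons, List.foldl_cons]
    rcases h with h | h
    · have h1 : 0 < l.length := by cases l <;> simp_all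
      have h2 : 1 ≤ max 0 (pvNC l) := by unfold pvNC; omega
      exact le_trans h2 (pvMax_foldl_le _ _)
    · calc 1 ≤ (t.map pvNC).foldl max 0 := by
            simpa [pvMaxChunks] using ih h
        _ ≤ (t.map pvNC).foldl max (max 0 (pvNC l)) := pvMax_foldl_mono _ _ _ (by omega)

theorem pvG_all_empty (n : Nat) (ls : List (List Int)) (h : ∀ l ∈ ls, l = []) :
    pvG n ls = [] := by
  induction n generalizing ls with
  | zero => rfl
  | succ n ih =>
    simp only [pvG]
    rw [List.flatMap_eq_nil_iff.mpr (fun l hl => by rw [h l hl]; rfl), List.nil_append]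
    exact ih _ (fun l hl => by
      rcases List.mem_map.mp hl with ⟨l', hl', rfl⟩
      rw [h l' hl']
      rfl)

theorem pvALoop_eq (ls : List (List Int)) (res : List Int) :
    pvALoop ls res = res ++ pvG (pvMaxChunks ls) ls := by
  induction ls, res using pvALoop.induct with
  | case1 lists result h ih =>
    rw [pvALoop, dif_pos h]
    rw [ih]
    simp only [pvACycle, pvAStep_foldl, List.nil_append]
    rw [pvMaxChunks_drop]
    have h1 := pvMaxChunks_pos lists h
    rw [show pvMaxChunks lists = (pvMaxChunks lists - 1) + 1 from by omega]
    simp only [pvG, Nat.add_sub_cancel, List.append_assoc]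
  | case2 lists result h =>
    rw [pvALoop, dif_neg h]
    have hall : ∀ l ∈ lists, l = [] := by
      intro l hl
      have h' : lists.any (fun l => !l.isEmpty) = false := by simpa using h
      have := List.any_eq_false.mp h' l hl
      simpa using this
    rw [pvG_all_empty _ _ hall, List.append_nil]

-- ===== VERDICT (by name: the statement is the Claim_ definition above) =====
theorem take_two_from_each_cycle_spec : Claim_equal_take_two_from_each_cycle := by
  intro ls _
  unfold Spec_take_two_from_each_cycle
  rw [pvAlt_eq_G, take_two_from_each_cycle, pvALoop_eq, List.nil_append]
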